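-- pv_equiv track=rewrite | github.com/BaeByoungSul/python_beginner | Day06/04_return_practice.py | count_number_state
-- ===== SOURCE A (Python) =====
-- def count_number_state(n_list):
--   state = {
--     'positive' : 0,
--     'negative' : 0,
--     'zero':0
--   }
--   # 음수가 몇개인지
--   for n in (n_list):
--     if n > 0:
--       state['positive'] +=1
--     elif n < 0:
--       state['negative'] +=1
--     else:
--       state['zero'] +=1
--
--   return state
-- ===== SOURCE B (Python) =====
-- def count_number_state(n_list):
--     positive = sum(1 for n in n_list if n > 0)
--     negative = sum(1 for n in n_list if n < 0)
--     zero = len(n_list) - positive - negative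
--     return {'positive': positive, 'negative': negative, 'zero': zero}
-- ===== Notes on version B (the rewrite author's own statement) =====
-- stated objective: alternative
-- what changed: Replaces the single branching loop that updates a dict in place with three separate aggregations: two filtered one-line counts and an arithmetic deduction len - positive - negative for zeros.
import Mathlib
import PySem

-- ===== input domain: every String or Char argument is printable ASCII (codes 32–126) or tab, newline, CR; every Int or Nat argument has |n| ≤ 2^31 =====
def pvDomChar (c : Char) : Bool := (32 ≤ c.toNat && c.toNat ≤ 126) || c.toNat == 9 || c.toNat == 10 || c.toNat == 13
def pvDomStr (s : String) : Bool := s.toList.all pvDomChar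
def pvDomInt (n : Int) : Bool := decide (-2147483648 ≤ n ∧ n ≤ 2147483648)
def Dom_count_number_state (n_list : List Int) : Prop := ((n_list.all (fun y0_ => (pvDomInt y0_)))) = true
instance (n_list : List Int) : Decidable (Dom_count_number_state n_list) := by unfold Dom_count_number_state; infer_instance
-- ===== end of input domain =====

-- B replaces A's single branching loop over a mutable dict with three separate aggregations
-- (two filtered counts and zero = len - positive - negative); alternative decomposition, same cost.

-- ===== PORT A =====
def count_number_state (n_list : List Int) : List (String × Int) :=
  (n_list.foldl (fun state n =>
      if n > 0 then state.modify "positive" 0 (· + 1)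
      else if n < 0 then state.modify "negative" 0 (· + 1)
      else state.modify "zero" 0 (· + 1))
    (PySem.Dict.ofList [("positive", 0), ("negative", 0), ("zero", 0)])).items

-- ===== PORT B =====
def count_number_state_alt (n_list : List Int) : List (String × Int) :=
  let positive : Int := (n_list.countP (fun n => decide (n > 0)) : Nat)
  let negative : Int := (n_list.countP (fun n => decide (n < 0)) : Nat)
  let zero : Int := (n_list.length : Int) - positive - negative
  [("positive", positive), ("negative", negative), ("zero", zero)]

-- ===== PRECONDITION & SPEC =====
def Spec_count_number_state (n_list : List Int) (out : List (String × Int)) : Prop := out = count_number_state_alt n_list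
instance (n_list : List Int) (out : List (String × Int)) : Decidable (Spec_count_number_state n_list out) := by unfold Spec_count_number_state; infer_instance

-- ===== CLAIM (what is proved, stated in full; the proofs are below) =====
def Claim_equal_count_number_state : Prop := ∀ (n_list : List Int), Dom_count_number_state n_list → Spec_count_number_state n_list (count_number_state n_list)

-- ===== LEMMAS AND PROOFS =====

-- invariant of A's loop: the dict stays on the three keys, each accumulating its count
lemma count_fold_items (l : List Int) (a b c : Int) :
    (l.foldl (fun state n =>
        if n > 0 then state.modify "positive" 0 (· + 1)
        else if n < 0 then state.modify "negative" 0 (· + 1)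
        else state.modify "zero" 0 (· + 1))
      (PySem.Dict.mk [("positive", a), ("negative", b), ("zero", c)])).items
    = [("positive", a + (l.countP (fun n => decide (n > 0)) : Nat)),
       ("negative", b + (l.countP (fun n => decide (n < 0)) : Nat)),
       ("zero", c + (l.countP (fun n => decide (n = 0)) : Nat))] := by
  induction l generalizing a b c with
  | nil => simp
  | cons x xs ih =>
    by_cases h1 : x > 0
    · have : (if x > 0 then
          (PySem.Dict.mk [("positive", a), ("negative", b), ("zero", c)]).modify "positive" 0 (· + 1)
        else if x < 0 then
          (PySem.Dict.mk [("positive", a), ("negative", b), ("zero", c)]).modify "negative" 0 (· + 1)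
        else (PySem.Dict.mk [("positive", a), ("negative", b), ("zero", c)]).modify "zero" 0 (· + 1))
          = PySem.Dict.mk [("positive", a + 1), ("negative", b), ("zero", c)] := by
        simp [h1]; rfl
      simp only [List.foldl_cons, this, ih]
      have hx0 : ¬ (x = 0) := by omega
      have hxn : ¬ (x < 0) := by omega
      simp [h1, hx0, hxn]
      ring
    · by_cases h2 : x < 0
      · have : (if x > 0 then
            (PySem.Dict.mk [("positive", a), ("negative", b), ("zero", c)]).modify "positive" 0 (· + 1)
          else if x < 0 then
            (PySem.Dict.mk [("positive", a), ("negative", b), ("zero", c)]).modify "negative" 0 (· + 1)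
          else (PySem.Dict.mk [("positive", a), ("negative", b), ("zero", c)]).modify "zero" 0 (· + 1))
            = PySem.Dict.mk [("positive", a), ("negative", b + 1), ("zero", c)] := by
          simp [h1, h2]; rfl
        simp only [List.foldl_cons, this, ih]
        have hx0 : ¬ (x = 0) := by omega
        simp [h1, hx0, h2]
        ring
      · have hx0 : x = 0 := by omega
        have : (if x > 0 then
            (PySem.Dict.mk [("positive", a), ("negative", b), ("zero", c)]).modify "positive" 0 (· + 1)
          else if x < 0 then
            (PySem.Dict.mk [("positive", a), ("negative", b), ("zero", c)]).modify "negative" 0 (· + 1)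
          else (PySem.Dict.mk [("positive", a), ("negative", b), ("zero", c)]).modify "zero" 0 (· + 1))
            = PySem.Dict.mk [("positive", a), ("negative", b), ("zero", c + 1)] := by
          simp [h1, h2]; rfl
        simp only [List.foldl_cons, this, ih]
        simp [hx0]
        ring

lemma countP_three (l : List Int) :
    (l.countP (fun n => decide (n = 0)) : Int)
      = (l.length : Int) - (l.countP (fun n => decide (n > 0)) : Nat) - (l.countP (fun n => decide (n < 0)) : Nat) := by
  induction l with
  | nil => simp
  | cons x xs ih =>
    simp only [List.countP_cons, List.length_cons]
    by_cases h1 : x > 0 <;> by_cases h2 : x < 0 <;> by_cases h3 : x = 0 <;>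
      first | omega | (simp [h1, h2, h3]; simp only [gt_iff_lt] at *; omega)

-- ===== VERDICT (by name: the statement is the Claim_ definition above) =====
theorem count_number_state_spec : Claim_equal_count_number_state := by
  intro n_list _
  show count_number_state n_list = count_number_state_alt n_list
  unfold count_number_state count_number_state_alt
  have hof : PySem.Dict.ofList [("positive", (0:Int)), ("negative", 0), ("zero", 0)]
      = PySem.Dict.mk [("positive", 0), ("negative", 0), ("zero", 0)] := by decide
  rw [hof, count_fold_items n_list 0 0 0]
  simp [countP_three]
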